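-- pv_equiv track=rewrite | github.com/Mizamarzes/ejercicios_py_campus | ej_tuplas_conj_py/registro_vent_2.py | calcular_agregados
-- ===== SOURCE A (Python) =====
-- def calcular_agregados(ventas):
--     agregados = {}
--
--     for producto, cantidad, ingreso in ventas:
--         if producto not in agregados:
--             agregados[producto] = {"cantidad": 0, "ingreso": 0}
--
--         agregados[producto]["cantidad"] += cantidad
--         agregados[producto]["ingreso"] += ingreso
--
--     return agregados
-- ===== SOURCE B (Python) =====
-- def calcular_agregados(ventas):
--     orden = list(dict.fromkeys(p for p, _, _ in ventas))
--     return {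
--         p: {
--             "cantidad": sum(c for q, c, _ in ventas if q == p),
--             "ingreso": sum(i for q, _, i in ventas if q == p),
--         }
--         for p in orden
--     }
-- ===== Notes on version B (the rewrite author's own statement) =====
-- stated objective: alternative
-- what changed: B replaces A's single-pass per-element dict accumulation with a two-phase scheme: first an ordered dedup of the product keys, then one dict comprehension that computes each product's totals by per-key generator sums over the whole list.
import Mathlib
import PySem

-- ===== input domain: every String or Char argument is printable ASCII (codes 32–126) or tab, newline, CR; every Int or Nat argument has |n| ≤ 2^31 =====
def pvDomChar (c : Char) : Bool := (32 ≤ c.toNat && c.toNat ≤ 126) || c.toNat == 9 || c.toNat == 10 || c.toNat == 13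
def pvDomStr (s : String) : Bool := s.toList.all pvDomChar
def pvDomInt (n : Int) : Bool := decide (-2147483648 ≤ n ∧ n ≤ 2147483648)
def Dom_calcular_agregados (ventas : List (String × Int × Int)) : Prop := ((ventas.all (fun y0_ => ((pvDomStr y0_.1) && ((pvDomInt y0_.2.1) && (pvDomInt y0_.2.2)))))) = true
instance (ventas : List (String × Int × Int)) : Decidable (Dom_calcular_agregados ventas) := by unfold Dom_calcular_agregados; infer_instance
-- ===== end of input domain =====

-- B aggregates per product in two phases (ordered key dedup, then per-key sums) instead of A's
-- single-pass per-element dict accumulation; same result, stated objective: alternative.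


-- ===== PORT A =====
def calcular_agregados (ventas : List (String × Int × Int)) : List (String × List (String × Int)) :=
  let agregados :=
    ventas.foldl (fun d v =>
      let d := if d.contains v.1 then d
               else d.insert v.1 (PySem.Dict.mk [("cantidad", 0), ("ingreso", 0)])
      let d := d.modify v.1 (PySem.Dict.mk []) (fun inner => inner.modify "cantidad" 0 (· + v.2.1))
      d.modify v.1 (PySem.Dict.mk []) (fun inner => inner.modify "ingreso" 0 (· + v.2.2)))
      PySem.Dict.empty
  agregados.items.map (fun kv => (kv.1, kv.2.items))

-- ===== PORT B =====
def calcular_agregados_alt (ventas : List (String × Int × Int)) : List (String × List (String × Int)) :=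
  let orden := PySem.List.dedup (ventas.map (fun v => v.1))
  orden.map (fun p =>
    (p, [("cantidad", ((ventas.filter (fun v => v.1 == p)).map (fun v => v.2.1)).sum),
         ("ingreso",  ((ventas.filter (fun v => v.1 == p)).map (fun v => v.2.2)).sum)]))

-- ===== PRECONDITION & SPEC =====
def Spec_calcular_agregados (ventas : List (String × Int × Int)) (out : List (String × List (String × Int))) : Prop := out = calcular_agregados_alt ventas
instance (ventas : List (String × Int × Int)) (out : List (String × List (String × Int))) : Decidable (Spec_calcular_agregados ventas out) := by unfold Spec_calcular_agregados; infer_instance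

-- ===== CLAIM (what is proved, stated in full; the proofs are below) =====
def Claim_equal_calcular_agregados : Prop := ∀ (ventas : List (String × Int × Int)), Dom_calcular_agregados ventas → Spec_calcular_agregados ventas (calcular_agregados ventas)

-- ===== LEMMAS AND PROOFS =====

-- The step function of A's fold, named for the proofs.
def pvStepA (d : PySem.Dict String (PySem.Dict String Int)) (v : String × Int × Int) :
    PySem.Dict String (PySem.Dict String Int) :=
  let d := if d.contains v.1 then d
           else d.insert v.1 (PySem.Dict.mk [("cantidad", 0), ("ingreso", 0)])
  let d := d.modify v.1 (PySem.Dict.mk []) (fun inner => inner.modify "cantidad" 0 (· + v.2.1))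
  d.modify v.1 (PySem.Dict.mk []) (fun inner => inner.modify "ingreso" 0 (· + v.2.2))

def pvSumC (l : List (String × Int × Int)) (p : String) : Int :=
  ((l.filter (fun v => v.1 == p)).map (fun v => v.2.1)).sum

def pvSumI (l : List (String × Int × Int)) (p : String) : Int :=
  ((l.filter (fun v => v.1 == p)).map (fun v => v.2.2)).sum

def pvInner (l : List (String × Int × Int)) (p : String) : PySem.Dict String Int :=
  PySem.Dict.mk [("cantidad", pvSumC l p), ("ingreso", pvSumI l p)]

lemma pvMk_modify_c (a b c : Int) :
    (PySem.Dict.mk [("cantidad", a), ("ingreso", b)]).modify "cantidad" 0 (· + c)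
      = PySem.Dict.mk [("cantidad", a + c), ("ingreso", b)] := by
  simp [PySem.Dict.modify, PySem.Dict.insert, PySem.Dict.getD, PySem.Dict.get?,
        PySem.Dict.contains]

lemma pvMk_modify_i (a b c : Int) :
    (PySem.Dict.mk [("cantidad", a), ("ingreso", b)]).modify "ingreso" 0 (· + c)
      = PySem.Dict.mk [("cantidad", a), ("ingreso", b + c)] := by
  simp [PySem.Dict.modify, PySem.Dict.insert, PySem.Dict.getD, PySem.Dict.get?,
        PySem.Dict.contains]

lemma pvKeys_mk_map {ν : Type} (ks : List String) (g : String → ν) :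
    (PySem.Dict.mk (ks.map (fun q => (q, g q)))).keys = ks := by
  simp [PySem.Dict.keys, Function.comp_def]

lemma pvContains_mk_map {ν : Type} (ks : List String) (g : String → ν) (p : String) :
    (PySem.Dict.mk (ks.map (fun q => (q, g q)))).contains p = decide (p ∈ ks) := by
  rw [PySem.Dict.contains_eq_decide_mem_keys, pvKeys_mk_map]

lemma pvGetD_mk_map {ν : Type} (ks : List String) (g : String → ν) (p : String)
    (hp : p ∈ ks) (hnd : ks.Nodup) (d0 : ν) :
    (PySem.Dict.mk (ks.map (fun q => (q, g q)))).getD p d0 = g p := by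
  apply PySem.Dict.getD_of_mem_items
  · exact List.mem_map_of_mem hp
  · rw [pvKeys_mk_map]; exact hnd

lemma pvInsert_mk_map {ν : Type} (ks : List String) (g : String → ν) (p : String)
    (hp : p ∈ ks) (w : ν) :
    (PySem.Dict.mk (ks.map (fun q => (q, g q)))).insert p w
      = PySem.Dict.mk (ks.map (fun q => (q, if q = p then w else g q))) := by
  apply PySem.Dict.ext
  rw [PySem.Dict.items_insert_of_contains _ _ (by rw [pvContains_mk_map]; simpa)]
  simp only [List.map_map]
  apply List.map_congr_left
  intro q _
  by_cases h : q = p <;> simp [h]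

lemma pvModify_mk_map {ν : Type} (ks : List String) (g : String → ν) (p : String)
    (hp : p ∈ ks) (hnd : ks.Nodup) (d0 : ν) (f : ν → ν) :
    (PySem.Dict.mk (ks.map (fun q => (q, g q)))).modify p d0 f
      = PySem.Dict.mk (ks.map (fun q => (q, if q = p then f (g p) else g q))) := by
  rw [PySem.Dict.modify, pvGetD_mk_map ks g p hp hnd, pvInsert_mk_map ks g p hp]

lemma pvDedup_append (xs : List String) (x : String) :
    PySem.List.dedup (xs ++ [x])
      = if x ∈ PySem.List.dedup xs then PySem.List.dedup xs
        else PySem.List.dedup xs ++ [x] := by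
  simp only [PySem.List.dedup, PySem.Set.ofList, List.foldl_append, List.foldl_cons,
    List.foldl_nil, PySem.Set.add]
  by_cases h : x ∈ List.foldl PySem.Set.add PySem.Set.empty xs <;>
    simp_all

lemma pvSumC_append (l : List (String × Int × Int)) (v : String × Int × Int) (p : String) :
    pvSumC (l ++ [v]) p = pvSumC l p + (if v.1 = p then v.2.1 else 0) := by
  by_cases h : v.1 = p <;> simp [pvSumC, List.filter_append, h]

lemma pvSumI_append (l : List (String × Int × Int)) (v : String × Int × Int) (p : String) :
    pvSumI (l ++ [v]) p = pvSumI l p + (if v.1 = p then v.2.2 else 0) := by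
  by_cases h : v.1 = p <;> simp [pvSumI, List.filter_append, h]

lemma pvSumC_notmem (l : List (String × Int × Int)) (p : String)
    (h : p ∉ l.map (fun v => v.1)) : pvSumC l p = 0 := by
  have : l.filter (fun v => v.1 == p) = [] := by
    rw [List.filter_eq_nil_iff]
    intro a ha
    simp only [beq_iff_eq]
    intro hx
    exact h (by simpa [hx] using List.mem_map_of_mem (f := fun v => v.1) ha)
  simp [pvSumC, this]

lemma pvSumI_notmem (l : List (String × Int × Int)) (p : String)
    (h : p ∉ l.map (fun v => v.1)) : pvSumI l p = 0 := by
  have : l.filter (fun v => v.1 == p) = [] := by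
    rw [List.filter_eq_nil_iff]
    intro a ha
    simp only [beq_iff_eq]
    intro hx
    exact h (by simpa [hx] using List.mem_map_of_mem (f := fun v => v.1) ha)
  simp [pvSumI, this]

lemma pvFoldA (l : List (String × Int × Int)) :
    l.foldl pvStepA PySem.Dict.empty
      = PySem.Dict.mk ((PySem.List.dedup (l.map (fun v => v.1))).map
          (fun p => (p, pvInner l p))) := by
  induction l using List.reverseRecOn with
  | nil => rfl
  | append_singleton l v ih =>
    rw [List.foldl_append, List.foldl_cons, List.foldl_nil, ih]
    set ks := PySem.List.dedup (l.map (fun v => v.1)) with hks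
    have hnd : ks.Nodup := PySem.List.nodup_dedup _
    have hmem : ∀ q, q ∈ ks ↔ q ∈ l.map (fun v => v.1) := fun q => PySem.List.mem_dedup _ _
    have hkeys : PySem.List.dedup ((l ++ [v]).map (fun w => w.1))
        = if v.1 ∈ ks then ks else ks ++ [v.1] := by
      rw [List.map_append, List.map_cons, List.map_nil, pvDedup_append]
    by_cases hm : v.1 ∈ ks
    · -- existing product: A modifies its entry in place
      rw [hkeys, if_pos hm]
      rw [pvStepA]
      simp only [pvContains_mk_map, hm, decide_true, if_true]
      rw [pvModify_mk_map ks _ v.1 hm hnd]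
      rw [pvModify_mk_map ks _ v.1 hm hnd]
      apply PySem.Dict.ext
      apply List.map_congr_left
      intro q hq
      by_cases h : q = v.1
      · subst h
        simp [pvInner, pvMk_modify_c, pvMk_modify_i, pvSumC_append, pvSumI_append]
      · have h' : v.1 ≠ q := fun e => h e.symm
        simp [h, pvInner, pvSumC_append, pvSumI_append, h']
    · -- new product: A inserts a fresh zero entry, then modifies it
      rw [hkeys, if_neg hm]
      rw [pvStepA]
      simp only [pvContains_mk_map, hm, decide_false, Bool.false_eq_true, if_false]
      have hrepr : (PySem.Dict.mk (ks.map (fun q => (q, pvInner l q)))).insert v.1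
            (PySem.Dict.mk [("cantidad", 0), ("ingreso", 0)])
          = PySem.Dict.mk ((ks ++ [v.1]).map (fun q => (q,
              if q = v.1 then PySem.Dict.mk [("cantidad", 0), ("ingreso", 0)]
              else pvInner l q))) := by
        apply PySem.Dict.ext
        rw [PySem.Dict.items_insert_of_not_contains _ _ (by rw [pvContains_mk_map]; exact decide_eq_false hm)]
        rw [List.map_append]
        congr 1
        · apply List.map_congr_left
          intro q hq
          have hne : q ≠ v.1 := fun e => hm (e ▸ hq)
          simp [hne]
        · simp
      rw [hrepr]
      have hnd' : (ks ++ [v.1]).Nodup := by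
        refine List.Nodup.append hnd (List.nodup_singleton _) ?_
        intro a ha hb
        rw [List.mem_singleton] at hb
        exact hm (hb ▸ ha)
      have hm' : v.1 ∈ ks ++ [v.1] := by simp
      rw [pvModify_mk_map _ _ v.1 hm' hnd']
      rw [pvModify_mk_map _ _ v.1 hm' hnd']
      apply PySem.Dict.ext
      apply List.map_congr_left
      intro q hq
      by_cases h : q = v.1
      · subst h
        have hnl : v.1 ∉ l.map (fun w => w.1) := fun hin => hm ((hmem v.1).2 hin)
        simp [pvInner, pvMk_modify_c, pvMk_modify_i, pvSumC_append, pvSumI_append,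
          pvSumC_notmem l v.1 hnl, pvSumI_notmem l v.1 hnl]
      · have h' : v.1 ≠ q := fun e => h e.symm
        simp [h, pvInner, pvSumC_append, pvSumI_append, h']

-- ===== VERDICT (by name: the statement is the Claim_ definition above) =====
theorem calcular_agregados_spec : Claim_equal_calcular_agregados := by
  intro ventas _
  show calcular_agregados ventas = calcular_agregados_alt ventas
  have hA : calcular_agregados ventas
      = ((ventas.foldl pvStepA PySem.Dict.empty).items).map (fun kv => (kv.1, kv.2.items)) := rfl
  rw [hA, pvFoldA]
  show _ = calcular_agregados_alt ventas
  unfold calcular_agregados_alt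
  simp [pvInner, pvSumC, pvSumI]
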